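-- pv_equiv track=rewrite | github.com/dawoodaijaz97/Leetcode | minimum-number-of-primes-to-sum-to-target/solution.py | solve
-- ===== SOURCE A (Python) =====
-- from typing import List
--
-- def is_prime(n: int) -> bool:
--     """Check if a number is prime."""
--     if n <= 1:
--         return False
--     if n <= 3:
--         return True
--     if n % 2 == 0 or n % 3 == 0:
--         return False
--     i = 5
--     while i * i <= n:
--         if n % i == 0 or n % (i + 2) == 0:
--             return False
--         i += 6
--     return True
--
-- def generate_primes_up_to(n: int) -> List[int]:
--     """Generate a list of prime numbers up to n."""
--     primes = []
--     for num in range(2, n + 1):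
--         if is_prime(num):
--             primes.append(num)
--     return primes
--
-- def solve(target: int) -> int:
--     """
--     Return the minimum number of prime numbers that sum up to the target.
--
--     :param target: The target sum
--     :return: Minimum number of primes needed to sum to target
--     """
--     if target < 2:
--         return 0
--
--     primes = generate_primes_up_to(target)
--     dp = [float('inf')] * (target + 1)
--     dp[0] = 0
--
--     for prime in primes:
--         for num in range(prime, target + 1):
--             dp[num] = min(dp[num], dp[num - prime] + 1)
--
--     return dp[target]
-- ===== SOURCE B (Python) =====
-- def solve(target: int) -> int:
--     """
--     Minimum number of primes summing to target, by breadth-first layer expansion: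
--     layer k marks exactly the sums of k primes (capped at target), so the first
--     layer containing target is the answer; primality by plain trial division.
--     """
--     if target < 2:
--         return 0
--
--     def is_prime(n: int) -> bool:
--         if n < 2:
--             return False
--         d = 2
--         while d * d <= n:
--             if n % d == 0:
--                 return False
--             d += 1
--         return True
--
--     primes = [p for p in range(2, target + 1) if is_prime(p)]
--     frontier = [False] * (target + 1)
--     frontier[0] = True
--     count = 0
--     while not frontier[target]:
--         count += 1
--         new = [False] * (target + 1)
--         for s in range(target + 1):
--             if frontier[s]:
--                 for p in primes:
--                     if s + p <= target:
--                         new[s + p] = True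
--         frontier = new
--     return count
-- ===== Notes on version B (the rewrite author's own statement) =====
-- stated objective: faster
-- what changed: B replaces A's coin-change DP table (relaxing dp[num] over every amount for every prime) by a breadth-first layer search that marks the sums reachable with k primes level by level and returns the first level containing target; intended as a constant-factor win (few layers are ever built), and a timing run measured B well ahead of A at the sizes both finish.
import Mathlib
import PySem

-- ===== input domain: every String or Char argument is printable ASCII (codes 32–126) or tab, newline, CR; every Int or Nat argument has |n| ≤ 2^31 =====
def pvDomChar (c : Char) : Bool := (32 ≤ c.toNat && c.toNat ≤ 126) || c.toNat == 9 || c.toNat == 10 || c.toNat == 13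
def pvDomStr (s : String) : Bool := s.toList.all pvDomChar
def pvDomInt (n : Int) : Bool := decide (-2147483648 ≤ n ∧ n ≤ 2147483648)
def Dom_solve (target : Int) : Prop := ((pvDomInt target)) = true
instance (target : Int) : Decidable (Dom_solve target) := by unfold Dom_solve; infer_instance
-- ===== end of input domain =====

-- B replaces A's coin-change DP table by a breadth-first layer search over the sets of
-- sums reachable with k primes, returning the first layer containing the target.

-- termination helper for both trial-division loops
theorem pv_le_of_sq_le {i n : Int} (h : i * i ≤ n) : i ≤ n := by
  by_cases h0 : i ≤ 0
  · exact h0.trans (le_trans (mul_self_nonneg i) h)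
  · push_neg at h0
    calc i = i * 1 := (mul_one i).symm
      _ ≤ i * i := by nlinarith
      _ ≤ n := h

-- Python's min on int-or-inf values, made computable (the WithTop order instances are not)
def pvLeB (a b : WithTop Int) : Bool :=
  match a, b with
  | _, none => true
  | none, some _ => false
  | some x, some y => decide (x ≤ y)

def pvMin (a b : WithTop Int) : WithTop Int := if pvLeB a b then a else b

-- ===== PORT A =====
-- while i * i <= n: check n % i, n % (i+2); i += 6
def isPrimeLoopA (n i : Int) : Bool :=
  if h : i * i ≤ n then
    if PySem.Int.mod n i == 0 || PySem.Int.mod n (i + 2) == 0 then false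
    else isPrimeLoopA n (i + 6)
  else true
termination_by (n + 1 - i).toNat
decreasing_by have := pv_le_of_sq_le h; omega

def isPrimeA (n : Int) : Bool :=
  if n ≤ 1 then false
  else if n ≤ 3 then true
  else if PySem.Int.mod n 2 == 0 || PySem.Int.mod n 3 == 0 then false
  else isPrimeLoopA n 5

def primesUpToA (n : Int) : List Int :=
  (PySem.List.pyRange 2 (n + 1) 1).foldl
    (fun acc num => if isPrimeA num then acc ++ [num] else acc) []

-- float('inf') is modelled by ⊤ : WithTop Int; on every input where A returns, dp[target] is an int
def solve (target : Int) : Int :=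
  if target < 2 then 0
  else
    let primes := primesUpToA target
    let dp0 : Array (WithTop Int) := (Array.replicate (target + 1).toNat (⊤ : WithTop Int)).setIfInBounds 0 0
    let dp := primes.foldl
      (fun dp prime =>
        (PySem.List.pyRange prime (target + 1) 1).foldl
          (fun dp num =>
            dp.setIfInBounds num.toNat (pvMin (dp.getD num.toNat ⊤) (dp.getD (num - prime).toNat ⊤ + 1)))
          dp)
      dp0
    (dp.getD target.toNat ⊤).untopD 0

-- ===== PORT B =====
-- while d * d <= n: check n % d; d += 1
def isPrimeLoopB (n d : Int) : Bool :=
  if h : d * d ≤ n then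
    if PySem.Int.mod n d == 0 then false else isPrimeLoopB n (d + 1)
  else true
termination_by (n + 1 - d).toNat
decreasing_by have := pv_le_of_sq_le h; omega

def isPrimeB (n : Int) : Bool :=
  if n < 2 then false else isPrimeLoopB n 2

-- new = [False]*(target+1); for s in range(target+1): if frontier[s]: for p in primes: if s+p<=target: new[s+p]=True
def bfsStep (target : Int) (primes : List Int) (frontier : Array Bool) : Array Bool :=
  (PySem.List.pyRange 0 (target + 1) 1).foldl
    (fun new s =>
      if frontier.getD s.toNat false then
        primes.foldl
          (fun new p => if s + p ≤ target then new.setIfInBounds (s + p).toNat true else new)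
          new
      else new)
    (Array.replicate (target + 1).toNat false)

-- while not frontier[target]: count += 1; frontier = new layer  (fuel only makes the loop
-- total; fuel target.toNat + 1 is proved sufficient below, so the guard is never the result)
def bfsLoop (target : Int) (primes : List Int) : ℕ → Array Bool → Int → Int
  | 0, _, count => count
  | fuel+1, frontier, count =>
    if frontier.getD target.toNat false then count
    else bfsLoop target primes fuel (bfsStep target primes frontier) (count + 1)

def solve_alt (target : Int) : Int :=
  if target < 2 then 0
  else
    let primes := (PySem.List.pyRange 2 (target + 1) 1).filter isPrimeB
    let frontier0 := (Array.replicate (target + 1).toNat false).setIfInBounds 0 true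
    bfsLoop target primes (target.toNat + 1) frontier0 0

-- ===== PRECONDITION & SPEC =====
def Spec_solve (target : Int) (out : Int) : Prop := out = solve_alt target
instance (target : Int) (out : Int) : Decidable (Spec_solve target out) := by unfold Spec_solve; infer_instance

-- ===== CLAIM (what is proved, stated in full; the proofs are below) =====
def Claim_equal_solve : Prop := ∀ (target : Int), Dom_solve target → Spec_solve target (solve target)

-- ===== LEMMAS AND PROOFS =====

theorem pvLeB_iff {a b : WithTop Int} : pvLeB a b = true ↔ a ≤ b := by
  induction a using WithTop.recTopCoe <;> induction b using WithTop.recTopCoe <;>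
    simp [pvLeB, WithTop.coe_le_coe]

theorem pvMin_eq_min (a b : WithTop Int) : pvMin a b = min a b := by
  rw [pvMin, min_def]
  by_cases h : a ≤ b
  · rw [if_pos (pvLeB_iff.mpr h), if_pos h]
  · rw [if_neg (by simpa [pvLeB_iff] using h), if_neg h]

/- ---------- Part 1: both primality tests decide Nat.Prime ---------- -/

theorem loopB_char (n : Int) : ∀ d : Int, 2 ≤ d →
    (isPrimeLoopB n d = true ↔ ∀ e : Int, d ≤ e → e * e ≤ n → ¬ (e ∣ n)) := by
  have main : ∀ (k : ℕ) (d : Int), (n + 1 - d).toNat ≤ k → 2 ≤ d →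
      (isPrimeLoopB n d = true ↔ ∀ e : Int, d ≤ e → e * e ≤ n → ¬ (e ∣ n)) := by
    intro k
    induction k with
    | zero =>
      intro d hk h2
      have hd : n < d := by omega
      have hdd : ¬ d * d ≤ n := by nlinarith
      rw [isPrimeLoopB, dif_neg hdd]
      refine iff_of_true rfl ?_
      intro e hde hee
      exact absurd hee (by nlinarith)
    | succ k ih =>
      intro d hk h2
      rw [isPrimeLoopB]
      by_cases hdd : d * d ≤ n
      · rw [dif_pos hdd]
        by_cases hmod : PySem.Int.mod n d = 0
        · rw [if_pos (by simpa using hmod)]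
          refine iff_of_false (by simp) ?_
          intro hall
          exact hall d le_rfl hdd ((PySem.Int.mod_eq_zero_iff_dvd n d).mp hmod)
        · have hdn : ¬ (d ∣ n) := fun hdvd => hmod ((PySem.Int.mod_eq_zero_iff_dvd n d).mpr hdvd)
          have hle : d ≤ n := pv_le_of_sq_le hdd
          rw [if_neg (by simpa using hmod)]
          rw [ih (d + 1) (by omega) (by omega)]
          constructor
          · intro hall e hde hee
            rcases eq_or_lt_of_le hde with rfl | hlt
            · exact hdn
            · exact hall e (by omega) hee
          · intro hall e hde hee
            exact hall e (by omega) hee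
      · rw [dif_neg hdd]
        refine iff_of_true rfl ?_
        intro e hde hee
        exact absurd hee (by nlinarith)
  intro d h2
  exact main (n + 1 - d).toNat d le_rfl h2

theorem loopA_char (n : Int) : ∀ i : Int, 5 ≤ i →
    (isPrimeLoopA n i = true ↔
      ∀ k : ℕ, (i + 6*k) * (i + 6*k) ≤ n →
        ¬ ((i + 6*k) ∣ n) ∧ ¬ ((i + 6*k + 2) ∣ n)) := by
  have main : ∀ (fuel : ℕ) (i : Int), (n + 1 - i).toNat ≤ fuel → 5 ≤ i →
      (isPrimeLoopA n i = true ↔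
        ∀ k : ℕ, (i + 6*k) * (i + 6*k) ≤ n →
          ¬ ((i + 6*k) ∣ n) ∧ ¬ ((i + 6*k + 2) ∣ n)) := by
    intro fuel
    induction fuel with
    | zero =>
      intro i hk h5
      have hd : n < i := by omega
      have hii : ¬ i * i ≤ n := by nlinarith
      rw [isPrimeLoopA, dif_neg hii]
      refine iff_of_true rfl ?_
      intro k hkk
      have : (0:Int) ≤ 6 * (k:Int) := by positivity
      exact absurd hkk (by nlinarith)
    | succ fuel ih =>
      intro i hk h5
      rw [isPrimeLoopA]
      by_cases hii : i * i ≤ n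
      · rw [dif_pos hii]
        by_cases hbad : PySem.Int.mod n i = 0 ∨ PySem.Int.mod n (i + 2) = 0
        · rw [if_pos (by rcases hbad with h | h <;> simp [h])]
          refine iff_of_false (by simp) ?_
          intro hall
          have h0 := hall 0 (by simpa using hii)
          rcases hbad with h | h
          · have h1 : ¬ (i ∣ n) := by simpa using h0.1
            exact h1 ((PySem.Int.mod_eq_zero_iff_dvd n i).mp h)
          · have h1 : ¬ ((i + 2) ∣ n) := by simpa using h0.2
            exact h1 ((PySem.Int.mod_eq_zero_iff_dvd n (i+2)).mp h)
        · push_neg at hbad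
          have hle : i ≤ n := pv_le_of_sq_le hii
          rw [if_neg (by simp [hbad.1, hbad.2])]
          rw [ih (i + 6) (by omega) (by omega)]
          constructor
          · intro hall k hkk
            cases k with
            | zero =>
              simp only [Nat.cast_zero, mul_zero, add_zero] at hkk ⊢
              exact ⟨fun hd => hbad.1 ((PySem.Int.mod_eq_zero_iff_dvd n i).mpr hd),
                     fun hd => hbad.2 ((PySem.Int.mod_eq_zero_iff_dvd n (i+2)).mpr hd)⟩
            | succ k =>
              have harg : i + 6*((k+1 : ℕ) : Int) = (i + 6) + 6*(k : Int) := by push_cast; ring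
              rw [harg] at hkk ⊢
              exact hall k hkk
          · intro hall k hkk
            have harg : (i + 6) + 6*(k : Int) = i + 6*((k+1 : ℕ) : Int) := by push_cast; ring
            rw [harg] at hkk ⊢
            exact hall (k+1) hkk
      · rw [dif_neg hii]
        refine iff_of_true rfl ?_
        intro k hkk
        have : (0:Int) ≤ 6 * (k:Int) := by positivity
        exact absurd hkk (by nlinarith)
  intro i h5
  exact main (n + 1 - i).toNat i le_rfl h5

theorem pv_dvd_toNat {e n : Int} (he : 0 ≤ e) (hn : 0 ≤ n) :
    e ∣ n ↔ e.toNat ∣ n.toNat := by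
  rw [← Int.natCast_dvd_natCast, Int.toNat_of_nonneg he, Int.toNat_of_nonneg hn]

theorem isPrimeB_iff (n : Int) : isPrimeB n = true ↔ 2 ≤ n ∧ Nat.Prime n.toNat := by
  by_cases h2 : n < 2
  · rw [isPrimeB, if_pos h2]
    exact iff_of_false (by simp) (fun h => absurd h.1 (by omega))
  · rw [isPrimeB, if_neg h2, loopB_char n 2 le_rfl]
    constructor
    · intro hall
      refine ⟨by omega, ?_⟩
      by_contra hnp
      have hm2 : 2 ≤ n.toNat := by omega
      have hpf := Nat.minFac_prime (show n.toNat ≠ 1 by omega)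
      have hsq : n.toNat.minFac ^ 2 ≤ n.toNat := Nat.minFac_sq_le_self (by omega) hnp
      have hdvd : ((n.toNat.minFac : Int)) ∣ n := by
        rw [show n = (n.toNat : Int) from (Int.toNat_of_nonneg (by omega)).symm]
        exact_mod_cast Nat.minFac_dvd n.toNat
      have hc : ((n.toNat.minFac : Int)) * (n.toNat.minFac : Int) ≤ n := by
        rw [pow_two] at hsq
        calc ((n.toNat.minFac : Int)) * (n.toNat.minFac : Int)
            = ((n.toNat.minFac * n.toNat.minFac : ℕ) : Int) := by push_cast; ring
          _ ≤ (n.toNat : Int) := by exact_mod_cast hsq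
          _ = n := Int.toNat_of_nonneg (by omega)
      exact hall _ (by exact_mod_cast hpf.two_le) hc hdvd
    · rintro ⟨-, hp⟩ e he2 hee hdvd
      have hnd : e.toNat ∣ n.toNat := (pv_dvd_toNat (by omega) (by omega)).mp hdvd
      rcases hp.eq_one_or_self_of_dvd e.toNat hnd with h1 | hs
      · omega
      · have he : e = n := by omega
        subst he
        nlinarith

theorem isPrimeA_iff (n : Int) : isPrimeA n = true ↔ 2 ≤ n ∧ Nat.Prime n.toNat := by
  rw [isPrimeA]
  by_cases hn1 : n ≤ 1
  · rw [if_pos hn1]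
    exact iff_of_false (by simp) (fun h => absurd h.1 (by omega))
  · rw [if_neg hn1]
    by_cases hn3 : n ≤ 3
    · rw [if_pos hn3]
      refine iff_of_true rfl ⟨by omega, ?_⟩
      have : n = 2 ∨ n = 3 := by omega
      rcases this with rfl | rfl <;> decide
    · rw [if_neg hn3]
      by_cases hbad : PySem.Int.mod n 2 = 0 ∨ PySem.Int.mod n 3 = 0
      · rw [if_pos (by
          rcases hbad with h | h
          · have h2 : (2:Int) ∣ n := (PySem.Int.mod_eq_zero_iff_dvd n 2).mp h
            simp [h2]
          · have h3 : (3:Int) ∣ n := (PySem.Int.mod_eq_zero_iff_dvd n 3).mp h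
            simp [h3])]
        refine iff_of_false (by simp) ?_
        rintro ⟨-, hp⟩
        rcases hbad with h | h
        · have h2 : (2:Int) ∣ n := (PySem.Int.mod_eq_zero_iff_dvd n 2).mp h
          have : (2:ℕ) ∣ n.toNat := by
            have := (pv_dvd_toNat (by omega : (0:Int) ≤ 2) (by omega)).mp h2
            simpa using this
          rcases hp.eq_one_or_self_of_dvd 2 this with h1 | hs <;> omega
        · have h3 : (3:Int) ∣ n := (PySem.Int.mod_eq_zero_iff_dvd n 3).mp h
          have : (3:ℕ) ∣ n.toNat := by
            have := (pv_dvd_toNat (by omega : (0:Int) ≤ 3) (by omega)).mp h3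
            simpa using this
          rcases hp.eq_one_or_self_of_dvd 3 this with h1 | hs <;> omega
      · push_neg at hbad
        have hm2 : ¬ (2:Int) ∣ n := fun h => hbad.1 ((PySem.Int.mod_eq_zero_iff_dvd n 2).mpr h)
        have hm3 : ¬ (3:Int) ∣ n := fun h => hbad.2 ((PySem.Int.mod_eq_zero_iff_dvd n 3).mpr h)
        rw [if_neg (by simp [hm2, hm3]), loopA_char n 5 le_rfl]
        constructor
        · intro hall
          refine ⟨by omega, ?_⟩
          by_contra hnp
          have hpf := Nat.minFac_prime (show n.toNat ≠ 1 by omega)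
          have hsq : n.toNat.minFac ^ 2 ≤ n.toNat := Nat.minFac_sq_le_self (by omega) hnp
          have hdvdN : n.toNat.minFac ∣ n.toNat := Nat.minFac_dvd n.toNat
          have hdvd : ((n.toNat.minFac : Int)) ∣ n := by
            rw [show n = (n.toNat : Int) from (Int.toNat_of_nonneg (by omega)).symm]
            exact_mod_cast hdvdN
          set p := n.toNat.minFac with hpdef
          have hp2 : p ≠ 2 := by
            intro h
            rw [h] at hdvd
            exact hm2 (by exact_mod_cast hdvd)
          have hp3 : p ≠ 3 := by
            intro h
            rw [h] at hdvd
            exact hm3 (by exact_mod_cast hdvd)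
          have hp4 : p ≠ 4 := fun h => absurd (h ▸ hpf) (by decide)
          have hp5 : 5 ≤ p := by have := hpf.two_le; omega
          have hpm2 : p % 2 ≠ 0 := by
            intro h
            rcases hpf.eq_one_or_self_of_dvd 2 (Nat.dvd_of_mod_eq_zero h) with h1 | hs <;> omega
          have hpm3 : p % 3 ≠ 0 := by
            intro h
            rcases hpf.eq_one_or_self_of_dvd 3 (Nat.dvd_of_mod_eq_zero h) with h1 | hs <;> omega
          have hsq' : ((p : Int)) * (p : Int) ≤ n := by
            rw [pow_two] at hsq
            calc ((p : Int)) * (p : Int) = ((p * p : ℕ) : Int) := by push_cast; ring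
              _ ≤ (n.toNat : Int) := by exact_mod_cast hsq
              _ = n := Int.toNat_of_nonneg (by omega)
          have hp6 : p % 6 = 1 ∨ p % 6 = 5 := by omega
          rcases hp6 with h6 | h6
          · have hk : p = 5 + 6 * ((p - 7) / 6) + 2 := by omega
            have hcast : (5 : Int) + 6 * (((p - 7) / 6 : ℕ) : Int) + 2 = (p : Int) := by
              omega
            have hguard : ((5:Int) + 6 * (((p - 7) / 6 : ℕ) : Int)) * (5 + 6 * (((p - 7) / 6 : ℕ) : Int)) ≤ n := by
              have h57 : (5:Int) + 6 * (((p - 7) / 6 : ℕ) : Int) = (p : Int) - 2 := by omega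
              rw [h57]
              nlinarith [hsq', Int.natCast_nonneg p]
            have := (hall ((p - 7) / 6) hguard).2
            rw [hcast] at this
            exact this hdvd
          · have hk : p = 5 + 6 * ((p - 5) / 6) := by omega
            have hcast : (5 : Int) + 6 * (((p - 5) / 6 : ℕ) : Int) = (p : Int) := by
              omega
            have hguard : ((5:Int) + 6 * (((p - 5) / 6 : ℕ) : Int)) * (5 + 6 * (((p - 5) / 6 : ℕ) : Int)) ≤ n := by
              rw [hcast]; exact hsq'
            have := (hall ((p - 5) / 6) hguard).1
            rw [hcast] at this
            exact this hdvd
        · rintro ⟨-, hp⟩ k hkk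
          have hk0 : (0:Int) ≤ (k : Int) := Int.natCast_nonneg k
          constructor
          · intro hdvd
            have hnd := (pv_dvd_toNat (by omega) (by omega : (0:Int) ≤ n)).mp hdvd
            rcases hp.eq_one_or_self_of_dvd _ hnd with h1 | hs
            · omega
            · have he : (5:Int) + 6*(k:Int) = n := by omega
              rw [he] at hkk
              nlinarith
          · intro hdvd
            have hnd := (pv_dvd_toNat (by omega) (by omega : (0:Int) ≤ n)).mp hdvd
            rcases hp.eq_one_or_self_of_dvd _ hnd with h1 | hs
            · omega
            · have he : (5:Int) + 6*(k:Int) + 2 = n := by omega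
              nlinarith

/- ---------- Part 2: the common value function F ---------- -/

def primesN (n : ℕ) : List ℕ := (List.range (n + 1)).filter (fun p => decide (Nat.Prime p))

def Fstep (l : List (WithTop Int)) (n : ℕ) : WithTop Int :=
  ((primesN n).map (fun p => l.getD (n - p) ⊤ + 1)).foldr min ⊤

def FL : ℕ → List (WithTop Int)
  | 0 => [0]
  | m+1 => FL m ++ [Fstep (FL m) (m+1)]

def F (n : ℕ) : WithTop Int := (FL n).getD n ⊤

theorem FL_length (m : ℕ) : (FL m).length = m + 1 := by
  induction m with
  | zero => rfl
  | succ m ih => simp [FL, ih]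

theorem FL_getD_stable (m k : ℕ) (hk : k ≤ m) : (FL m).getD k ⊤ = F k := by
  induction m with
  | zero => interval_cases k; rfl
  | succ m ih =>
    rcases Nat.lt_or_ge k (m+1) with h | h
    · rw [FL, List.getD_eq_getElem?_getD, List.getElem?_append_left (by rw [FL_length]; omega),
        ← List.getD_eq_getElem?_getD, ih (by omega)]
    · have : k = m + 1 := by omega
      subst this; rfl

theorem mem_primesN {p n : ℕ} : p ∈ primesN n ↔ Nat.Prime p ∧ p ≤ n := by
  simp [primesN, List.mem_filter, and_comm]

theorem F_zero : F 0 = 0 := rfl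

theorem F_succ (n : ℕ) (hn : 1 ≤ n) :
    F n = ((primesN n).map (fun p => F (n - p) + 1)).foldr min ⊤ := by
  obtain ⟨m, rfl⟩ : ∃ m, n = m + 1 := ⟨n - 1, by omega⟩
  have h1 : F (m+1) = Fstep (FL m) (m+1) := by
    rw [F, FL, List.getD_eq_getElem?_getD, List.getElem?_append_right (by simp [FL_length])]
    simp [FL_length]
  rw [h1, Fstep]
  congr 1
  apply List.map_congr_left
  intro p hp
  have hp' := mem_primesN.mp hp
  rw [FL_getD_stable m _ (by have := hp'.1.two_le; omega)]

theorem foldr_min_le {α : Type} (l : List α) (g : α → WithTop Int) {x : α} (hx : x ∈ l) :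
    (l.map g).foldr min ⊤ ≤ g x := by
  induction l with
  | nil => cases hx
  | cons a l ih =>
    rcases List.mem_cons.mp hx with rfl | hx
    · exact min_le_left _ _
    · exact le_trans (min_le_right _ _) (ih hx)

theorem foldr_min_cases {α : Type} (l : List α) (g : α → WithTop Int) :
    (l.map g).foldr min ⊤ = ⊤ ∨ ∃ x ∈ l, (l.map g).foldr min ⊤ = g x := by
  induction l with
  | nil => left; rfl
  | cons a l ih =>
    rcases ih with h | ⟨x, hx, h⟩
    · rcases min_cases (g a) ((l.map g).foldr min ⊤) with ⟨h', _⟩ | ⟨h', _⟩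
      · right; exact ⟨a, by simp, h'⟩
      · left; simpa [h] using h'
    · rcases min_cases (g a) ((l.map g).foldr min ⊤) with ⟨h', _⟩ | ⟨h', _⟩
      · right; exact ⟨a, by simp, h'⟩
      · right; exact ⟨x, by simp [hx], by simpa [h] using h'⟩

theorem F_le_of_prime {p n : ℕ} (hp : Nat.Prime p) (hpn : p ≤ n) : F n ≤ F (n - p) + 1 := by
  have hn : 1 ≤ n := le_trans hp.two_le hpn |>.trans' (by omega)
  rw [F_succ n (by have := hp.two_le; omega)]
  exact foldr_min_le _ _ (mem_primesN.mpr ⟨hp, hpn⟩)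

theorem F_min_cases (n : ℕ) (hn : 1 ≤ n) :
    F n = ⊤ ∨ ∃ p, Nat.Prime p ∧ p ≤ n ∧ F n = F (n - p) + 1 := by
  rw [F_succ n hn]
  rcases foldr_min_cases (primesN n) (fun p => F (n - p) + 1) with h | ⟨p, hp, h⟩
  · left; exact h
  · right; have := mem_primesN.mp hp; exact ⟨p, this.1, this.2, h⟩

/- ---------- Part 3: A's dp model ---------- -/

def passF (p : ℕ) (f : ℕ → WithTop Int) (n : ℕ) : WithTop Int :=
  if h : 1 ≤ p ∧ p ≤ n then min (f n) (passF p f (n - p) + 1) else f n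
termination_by n
decreasing_by omega

theorem passF_of_not {p : ℕ} {f : ℕ → WithTop Int} {n : ℕ} (h : ¬ (1 ≤ p ∧ p ≤ n)) :
    passF p f n = f n := by rw [passF]; simp [h]

theorem passF_of_le {p : ℕ} {f : ℕ → WithTop Int} {n : ℕ} (h1 : 1 ≤ p) (h2 : p ≤ n) :
    passF p f n = min (f n) (passF p f (n - p) + 1) := by
  rw [passF]; simp [h1, h2]

def dp0f : ℕ → WithTop Int := fun n => if n = 0 then 0 else ⊤

def Adp (ps : List ℕ) : ℕ → WithTop Int := ps.foldl (fun f p => passF p f) dp0f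

theorem F_le_passF {p : ℕ} (hp : Nat.Prime p) {f : ℕ → WithTop Int}
    (hf : ∀ m, F m ≤ f m) : ∀ n, F n ≤ passF p f n := by
  intro n
  induction n using Nat.strong_induction_on with
  | _ n ih =>
    by_cases h : 1 ≤ p ∧ p ≤ n
    · rw [passF_of_le h.1 h.2]
      refine le_min (hf n) ?_
      calc F n ≤ F (n - p) + 1 := F_le_of_prime hp h.2
        _ ≤ passF p f (n - p) + 1 := by
            gcongr; exact ih (n - p) (by have := hp.two_le; omega)
    · rw [passF_of_not h]; exact hf n

def Good (ps : List ℕ) (f : ℕ → WithTop Int) : Prop :=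
  ∀ q ∈ ps, ∀ n, q ≤ n → f n ≤ f (n - q) + 1

theorem good_pass {p : ℕ} (hp : 1 ≤ p) {ps : List ℕ} {f : ℕ → WithTop Int}
    (hG : Good ps f) : Good (p :: ps) (passF p f) := by
  intro q hq
  rcases List.mem_cons.mp hq with rfl | hq
  · intro n hqn
    rw [passF_of_le hp hqn]
    exact min_le_right _ _
  · intro n
    induction n using Nat.strong_induction_on with
    | _ n ih =>
      intro hqn
      by_cases hpn : p ≤ n
      · rw [passF_of_le hp hpn]
        by_cases hpq : p ≤ n - q
        · rw [passF_of_le hp hpq, ← min_add_add_right]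
          refine le_min ?_ ?_
          · exact le_trans (min_le_left _ _) (hG q hq n hqn)
          · refine le_trans (min_le_right _ _) ?_
            have harith : n - p - q = n - q - p := by omega
            have hstep : passF p f (n - p) ≤ passF p f (n - p - q) + 1 :=
              ih (n - p) (by omega) (by omega)
            rw [harith] at hstep
            calc passF p f (n - p) + 1 ≤ (passF p f (n - q - p) + 1) + 1 := by gcongr
              _ = passF p f (n - q - p) + 1 + 1 := rfl
        · rw [passF_of_not (fun hc => hpq hc.2)]
          exact le_trans (min_le_left _ _) (hG q hq n hqn)
      · rw [passF_of_not (fun hc => hpn hc.2)]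
        rw [passF_of_not (fun hc => hpn (le_trans hc.2 (Nat.sub_le n q)))]
        exact hG q hq n hqn

theorem good_mono {ps ps' : List ℕ} {f : ℕ → WithTop Int}
    (h : ∀ q ∈ ps', q ∈ ps) (hG : Good ps f) : Good ps' f :=
  fun q hq => hG q (h q hq)

theorem good_foldl : ∀ (ps : List ℕ) (f : ℕ → WithTop Int) (seen : List ℕ),
    (∀ q ∈ ps, 1 ≤ q) → Good seen f →
    Good (seen ++ ps) (ps.foldl (fun f p => passF p f) f) := by
  intro ps
  induction ps with
  | nil => intro f seen _ hG; simpa using hG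
  | cons p ps ih =>
    intro f seen hall hG
    have h1 : Good (p :: seen) (passF p f) := by
      have := good_pass (hall p (by simp)) hG
      exact good_mono (by intro q hq; simp at hq ⊢; tauto) this
    have h2 := ih (passF p f) (p :: seen) (fun q hq => hall q (by simp [hq])) h1
    refine good_mono ?_ h2
    intro q hq; simp at hq ⊢; tauto

theorem F_le_Adp (ps : List ℕ) (hps : ∀ q ∈ ps, Nat.Prime q) : ∀ m, F m ≤ Adp ps m := by
  have base : ∀ m, F m ≤ dp0f m := by
    intro m; unfold dp0f
    split
    · subst ‹m = 0›; simp [F_zero]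
    · exact le_top
  rw [Adp]
  generalize dp0f = f at base ⊢
  induction ps generalizing f with
  | nil => simpa using base
  | cons p ps ih =>
    exact ih (fun q hq => hps q (by simp [hq])) (passF p f)
      (F_le_passF (hps p (by simp)) base)

theorem Adp_zero (ps : List ℕ) (hps : ∀ q ∈ ps, 1 ≤ q) : Adp ps 0 = 0 := by
  rw [Adp]
  have base : dp0f 0 = 0 := rfl
  generalize dp0f = f at base ⊢
  induction ps generalizing f with
  | nil => simpa using base
  | cons p ps ih =>
    refine ih (fun q hq => hps q (by simp [hq])) (passF p f) ?_
    rw [passF_of_not (by have := hps p (by simp); omega)]; exact base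

theorem Adp_le_F (T : ℕ) (ps : List ℕ)
    (hmem : ∀ q, q ∈ ps ↔ Nat.Prime q ∧ q ≤ T) :
    ∀ n ≤ T, Adp ps n ≤ F n := by
  have hall1 : ∀ q ∈ ps, 1 ≤ q := fun q hq => ((hmem q).mp hq).1.two_le.trans' (by omega)
  have hGood : Good ps (Adp ps) := by
    have := good_foldl ps dp0f [] hall1 (by intro q hq; cases hq)
    simpa [Adp] using this
  intro n
  induction n using Nat.strong_induction_on with
  | _ n ih =>
    intro hnT
    rcases Nat.eq_zero_or_pos n with rfl | hn
    · rw [Adp_zero ps hall1, F_zero]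
    · rcases F_min_cases n hn with h | ⟨p, hp, hpn, h⟩
      · rw [h]; exact le_top
      · have hmem' : p ∈ ps := (hmem p).mpr ⟨hp, hpn.trans hnT⟩
        calc Adp ps n ≤ Adp ps (n - p) + 1 := hGood p hmem' n hpn
          _ ≤ F (n - p) + 1 := by
              gcongr; exact ih (n - p) (by have := hp.two_le; omega) (by omega)
          _ = F n := h.symm

theorem Adp_eq_F (T : ℕ) (ps : List ℕ)
    (hmem : ∀ q, q ∈ ps ↔ Nat.Prime q ∧ q ≤ T) :
    ∀ n ≤ T, Adp ps n = F n := by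
  intro n hn
  exact le_antisymm (Adp_le_F T ps hmem n hn)
    (F_le_Adp ps (fun q hq => ((hmem q).mp hq).1) n)

/- ---------- Part 4: port A computes Adp ---------- -/

theorem arr_getD_eq {α : Type} (a : Array α) (i : ℕ) (d : α) : a.getD i d = (a[i]?).getD d := by
  rw [Array.getD]
  split
  · rw [Array.getElem?_eq_getElem ‹_›, Option.getD_some]; rfl
  · rw [Array.getElem?_eq_none (by omega), Option.getD_none]

theorem agetD_set_self {α : Type} {a : Array α} {i : ℕ} (h : i < a.size) (v d : α) :
    (a.setIfInBounds i v).getD i d = v := by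
  rw [arr_getD_eq, Array.getElem?_setIfInBounds, if_pos rfl, if_pos h, Option.getD_some]

theorem agetD_set_ne {α : Type} {a : Array α} {i j : ℕ} (h : i ≠ j) (v d : α) :
    (a.setIfInBounds i v).getD j d = a.getD j d := by
  rw [arr_getD_eq, Array.getElem?_setIfInBounds, if_neg h, ← arr_getD_eq]

theorem agetD_replicate {α : Type} {n k : ℕ} (h : k < n) (v d : α) :
    (Array.replicate n v).getD k d = v := by
  rw [arr_getD_eq, Array.getElem?_replicate, if_pos h, Option.getD_some]

theorem asize_set {α : Type} (a : Array α) (i : ℕ) (v : α) :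
    (a.setIfInBounds i v).size = a.size := Array.size_setIfInBounds

theorem psA_mem (target : Int) (h2 : 2 ≤ target) (q : ℕ) :
    q ∈ (primesUpToA target).map Int.toNat ↔ Nat.Prime q ∧ q ≤ target.toNat := by
  rw [primesUpToA, PySem.List.foldl_append_if_eq_filter]
  simp only [List.nil_append, List.mem_map, List.mem_filter, PySem.List.mem_pyRange_one]
  constructor
  · rintro ⟨x, ⟨⟨hx2, hxlt⟩, hxp⟩, rfl⟩
    have hx := (isPrimeA_iff x).mp hxp
    exact ⟨hx.2, by omega⟩
  · rintro ⟨hq, hqle⟩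
    have h2q : (2:Int) ≤ (q : Int) := by exact_mod_cast hq.two_le
    refine ⟨(q : Int), ⟨⟨h2q, by omega⟩, ?_⟩, by simp⟩
    rw [isPrimeA_iff]
    exact ⟨h2q, by simpa using hq⟩

theorem innerA_glue (target p : Int) (hp : 2 ≤ p) :
    ∀ (fuel : ℕ) (m : Int) (f : ℕ → WithTop Int) (l : Array (WithTop Int)),
      (target + 1 - m).toNat ≤ fuel →
      p ≤ m → m ≤ target + 1 →
      l.size = (target + 1).toNat →
      (∀ k : ℕ, k < m.toNat → l.getD k ⊤ = passF p.toNat f k) →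
      (∀ k : ℕ, m.toNat ≤ k → k < (target + 1).toNat → l.getD k ⊤ = f k) →
      ((PySem.List.pyRange m (target + 1) 1).foldl
          (fun dp num => dp.setIfInBounds num.toNat (pvMin (dp.getD num.toNat ⊤) (dp.getD (num - p).toNat ⊤ + 1))) l).size
        = (target + 1).toNat ∧
      ∀ k : ℕ, k < (target + 1).toNat →
        ((PySem.List.pyRange m (target + 1) 1).foldl
          (fun dp num => dp.setIfInBounds num.toNat (pvMin (dp.getD num.toNat ⊤) (dp.getD (num - p).toNat ⊤ + 1))) l).getD k ⊤
          = passF p.toNat f k := by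
  intro fuel
  induction fuel with
  | zero =>
    intro m f l hk hpm hmt hlen h1 h2
    have hm : m = target + 1 := by omega
    subst hm
    rw [PySem.List.pyRange_one_eq_nil le_rfl]
    exact ⟨hlen, fun k hkN => h1 k (by omega)⟩
  | succ fuel ih =>
    intro m f l hk hpm hmt hlen h1 h2
    by_cases hlt : m < target + 1
    · rw [PySem.List.pyRange_one_cons hlt]
      simp only [List.foldl_cons]
      have hmN : m.toNat < (target + 1).toNat := by omega
      have hval : pvMin (l.getD m.toNat ⊤) (l.getD (m - p).toNat ⊤ + 1) = passF p.toNat f m.toNat := by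
        have hsub : (m - p).toNat = m.toNat - p.toNat := by omega
        rw [h2 m.toNat le_rfl hmN, hsub, h1 _ (by omega), pvMin_eq_min]
        conv_rhs => rw [passF_of_le (by omega) (by omega)]
      refine ih (m + 1) f
          (l.setIfInBounds m.toNat (pvMin (l.getD m.toNat ⊤) (l.getD (m - p).toNat ⊤ + 1)))
          (by omega) (by omega) (by omega) (by rw [asize_set]; exact hlen) ?_ ?_
      · intro k hk1
        rcases Nat.lt_or_ge k m.toNat with hlt' | hge'
        · rw [agetD_set_ne (by omega) _ _]
          exact h1 k hlt'
        · have hkm : k = m.toNat := by omega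
          subst hkm
          rw [agetD_set_self (by omega) _ _]
          exact hval
      · intro k hklo hkhi
        rw [agetD_set_ne (by omega) _ _]
        exact h2 k (by omega) hkhi
    · have hm : m = target + 1 := by omega
      subst hm
      rw [PySem.List.pyRange_one_eq_nil le_rfl]
      exact ⟨hlen, fun k hkN => h1 k (by omega)⟩

theorem outerA_glue (target : Int) :
    ∀ (ps : List Int) (f : ℕ → WithTop Int) (l : Array (WithTop Int)),
      (∀ x ∈ ps, 2 ≤ x ∧ x ≤ target) →
      l.size = (target + 1).toNat →
      (∀ k : ℕ, k < (target + 1).toNat → l.getD k ⊤ = f k) →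
      (ps.foldl
          (fun dp prime =>
            (PySem.List.pyRange prime (target + 1) 1).foldl
              (fun dp num => dp.setIfInBounds num.toNat (pvMin (dp.getD num.toNat ⊤) (dp.getD (num - prime).toNat ⊤ + 1))) dp)
          l).size = (target + 1).toNat ∧
      ∀ k : ℕ, k < (target + 1).toNat →
        (ps.foldl
          (fun dp prime =>
            (PySem.List.pyRange prime (target + 1) 1).foldl
              (fun dp num => dp.setIfInBounds num.toNat (pvMin (dp.getD num.toNat ⊤) (dp.getD (num - prime).toNat ⊤ + 1))) dp)
          l).getD k ⊤ = ((ps.map Int.toNat).foldl (fun f p => passF p f) f) k := by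
  intro ps
  induction ps with
  | nil => exact fun f l _ hlen h => ⟨hlen, fun k hk => h k hk⟩
  | cons x ps ihp =>
    intro f l hx hlen h
    obtain ⟨hx2, hxT⟩ := hx x List.mem_cons_self
    obtain ⟨hlen', hget'⟩ := innerA_glue target x hx2 (target + 1 - x).toNat x f l le_rfl le_rfl
        (by omega) hlen
        (fun k hk => by
          rw [passF_of_not (by omega)]
          exact h k (by omega))
        (fun k _ hk => h k hk)
    simp only [List.foldl_cons, List.map_cons]
    exact ihp (passF x.toNat f) _ (fun y hy => hx y (List.mem_cons_of_mem x hy)) hlen' hget'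

theorem solve_eq_F (target : Int) (h2 : 2 ≤ target) :
    solve target = (F target.toNat).untopD 0 := by
  have hn : ¬ target < 2 := by omega
  simp only [solve, hn, if_false]
  have hlen0 : ((Array.replicate (target + 1).toNat (⊤ : WithTop Int)).setIfInBounds 0 0).size
      = (target + 1).toNat := by rw [asize_set, Array.size_replicate]
  have hget0 : ∀ k : ℕ, k < (target + 1).toNat →
      ((Array.replicate (target + 1).toNat (⊤ : WithTop Int)).setIfInBounds 0 0).getD k ⊤ = dp0f k := by
    intro k hk
    rcases Nat.eq_zero_or_pos k with rfl | hkpos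
    · rw [agetD_set_self (by rw [Array.size_replicate]; omega) _ _]; rfl
    · rw [agetD_set_ne (by omega) _ _, agetD_replicate hk _ _]
      unfold dp0f
      rw [if_neg (by omega)]
  have hmemA : ∀ x ∈ primesUpToA target, 2 ≤ x ∧ x ≤ target := by
    intro x hx
    rw [primesUpToA, PySem.List.foldl_append_if_eq_filter, List.nil_append, List.mem_filter] at hx
    have := PySem.List.mem_pyRange_one.mp hx.1
    omega
  obtain ⟨hlen, hget⟩ := outerA_glue target (primesUpToA target) dp0f _ hmemA hlen0 hget0
  rw [hget target.toNat (by omega)]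
  have hF := Adp_eq_F target.toNat ((primesUpToA target).map Int.toNat)
      (psA_mem target h2) target.toNat le_rfl
  rw [show ((primesUpToA target).map Int.toNat).foldl (fun f p => passF p f) dp0f target.toNat
      = F target.toNat from hF]

/- ---------- Part 5: port B computes F via breadth-first layers ---------- -/

-- ExprN c n: n is a sum of exactly c primes
def ExprN : ℕ → ℕ → Prop
  | 0, n => n = 0
  | c+1, n => ∃ p, Nat.Prime p ∧ p ≤ n ∧ ExprN c (n - p)

theorem exprN_F : ∀ (c n : ℕ), ExprN c n → F n ≤ (c : Int) := by
  intro c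
  induction c with
  | zero =>
    intro n h
    rw [show n = 0 from h, F_zero]
    simp
  | succ c ih =>
    rintro n ⟨p, hp, hpn, hrest⟩
    calc F n ≤ F (n - p) + 1 := F_le_of_prime hp hpn
      _ ≤ ((c : Int) : WithTop Int) + 1 := by gcongr; exact ih _ hrest
      _ = ((c + 1 : ℕ) : Int) := by push_cast; rfl

theorem F_nonneg : ∀ (n : ℕ) (k : Int), F n = (k : WithTop Int) → 0 ≤ k := by
  intro n
  induction n using Nat.strong_induction_on with
  | _ n ih =>
    intro k hk
    rcases Nat.eq_zero_or_pos n with rfl | hn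
    · rw [F_zero] at hk
      have : (0 : Int) = k := by exact_mod_cast hk
      omega
    · rcases F_min_cases n hn with h | ⟨p, hp, hpn, h⟩
      · rw [h] at hk; cases hk
      · rw [h] at hk
        cases hm : F (n - p) with
        | top => rw [hm] at hk; simp at hk
        | coe m =>
          rw [hm] at hk
          have : ((m + 1 : Int) : WithTop Int) = (k : WithTop Int) := by
            rw [← hk]; push_cast; rfl
          have hmk : m + 1 = k := by exact_mod_cast this
          have := ih (n - p) (by have := hp.two_le; omega) m hm
          omega

theorem F_exprN : ∀ (n : ℕ) (c : ℕ), F n = ((c : Int) : WithTop Int) → ExprN c n := by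
  intro n
  induction n using Nat.strong_induction_on with
  | _ n ih =>
    intro c hc
    rcases Nat.eq_zero_or_pos n with rfl | hn
    · rw [F_zero] at hc
      have : (0 : Int) = (c : Int) := by exact_mod_cast hc
      have hc0 : c = 0 := by exact_mod_cast this.symm
      subst hc0; exact rfl
    · rcases F_min_cases n hn with h | ⟨p, hp, hpn, h⟩
      · rw [h] at hc; cases hc
      · rw [h] at hc
        cases hm : F (n - p) with
        | top => rw [hm] at hc; simp at hc
        | coe m =>
          rw [hm] at hc
          have : ((m + 1 : Int) : WithTop Int) = ((c : Int) : WithTop Int) := by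
            rw [← hc]; push_cast; rfl
          have hmk : m + 1 = (c : Int) := by exact_mod_cast this
          have hm0 : 0 ≤ m := F_nonneg _ _ hm
          have hc1 : 1 ≤ c := by omega
          obtain ⟨c', rfl⟩ : ∃ c', c = c' + 1 := ⟨c - 1, by omega⟩
          refine ⟨p, hp, hpn, ?_⟩
          refine ih (n - p) (by have := hp.two_le; omega) c' ?_
          rw [hm]
          congr 1
          omega

theorem exprN_exists : ∀ T : ℕ, 2 ≤ T → ∃ c, ExprN c T := by
  intro T
  induction T using Nat.strong_induction_on with
  | _ T ih =>
    intro h2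
    rcases Nat.lt_or_ge T 4 with h4 | h4
    · interval_cases T
      · exact ⟨1, ⟨2, by norm_num, by omega, rfl⟩⟩
      · exact ⟨1, ⟨3, by norm_num, by omega, rfl⟩⟩
    · obtain ⟨c, hc⟩ := ih (T - 2) (by omega) (by omega)
      exact ⟨c + 1, ⟨2, by norm_num, by omega, hc⟩⟩

theorem exprN_two_mul : ∀ (c n : ℕ), ExprN c n → 2 * c ≤ n := by
  intro c
  induction c with
  | zero => intro n h; omega
  | succ c ih =>
    rintro n ⟨p, hp, hpn, hrest⟩
    have := ih _ hrest
    have := hp.two_le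
    omega

theorem markPrimes (target s : Int) (hs : 0 ≤ s) :
    ∀ (ps : List Int) (new : Array Bool), (∀ p ∈ ps, 2 ≤ p) →
      new.size = (target + 1).toNat →
      ((ps.foldl (fun new p => if s + p ≤ target then new.setIfInBounds (s + p).toNat true else new) new).size
        = (target + 1).toNat) ∧
      (∀ k : ℕ,
        (ps.foldl (fun new p => if s + p ≤ target then new.setIfInBounds (s + p).toNat true else new) new).getD k false = true ↔
        new.getD k false = true ∨ ∃ p ∈ ps, s + p ≤ target ∧ k = (s + p).toNat) := by
  intro ps
  induction ps with
  | nil => intro new _ hsize; exact ⟨hsize, fun k => by simp⟩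
  | cons p ps ih =>
    intro new hall hsize
    have hp2 := hall p List.mem_cons_self
    simp only [List.foldl_cons]
    by_cases hle : s + p ≤ target
    · rw [if_pos hle]
      have hidx : (s + p).toNat < new.size := by rw [hsize]; omega
      obtain ⟨hsz, hmem⟩ := ih (new.setIfInBounds (s + p).toNat true)
          (fun q hq => hall q (List.mem_cons_of_mem _ hq))
          (by rw [asize_set]; exact hsize)
      refine ⟨hsz, fun k => ?_⟩
      rw [hmem k]
      by_cases hk : k = (s + p).toNat
      · subst hk
        rw [agetD_set_self hidx _ _]
        constructor
        · intro _; right; exact ⟨p, List.mem_cons_self, hle, rfl⟩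
        · intro _; left; rfl
      · rw [agetD_set_ne (fun h => hk h.symm) _ _]
        constructor
        · rintro (h | ⟨q, hq, hqle, rfl⟩)
          · left; exact h
          · right; exact ⟨q, List.mem_cons_of_mem _ hq, hqle, rfl⟩
        · rintro (h | ⟨q, hq, hqle, rfl⟩)
          · left; exact h
          · rcases List.mem_cons.mp hq with rfl | hq'
            · exact absurd rfl hk
            · right; exact ⟨q, hq', hqle, rfl⟩
    · rw [if_neg hle]
      obtain ⟨hsz, hmem⟩ := ih new (fun q hq => hall q (List.mem_cons_of_mem _ hq)) hsize
      refine ⟨hsz, fun k => ?_⟩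
      rw [hmem k]
      constructor
      · rintro (h | ⟨q, hq, hqle, rfl⟩)
        · left; exact h
        · right; exact ⟨q, List.mem_cons_of_mem _ hq, hqle, rfl⟩
      · rintro (h | ⟨q, hq, hqle, rfl⟩)
        · left; exact h
        · rcases List.mem_cons.mp hq with rfl | hq'
          · exact absurd hqle hle
          · right; exact ⟨q, hq', hqle, rfl⟩

theorem stepOuter (target : Int) (primes : List Int) (hall : ∀ p ∈ primes, 2 ≤ p)
    (fr : Array Bool) :
    ∀ (xs : List Int) (new : Array Bool), (∀ s ∈ xs, 0 ≤ s) →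
      new.size = (target + 1).toNat →
      ((xs.foldl
          (fun new s =>
            if fr.getD s.toNat false then
              primes.foldl
                (fun new p => if s + p ≤ target then new.setIfInBounds (s + p).toNat true else new)
                new
            else new) new).size = (target + 1).toNat) ∧
      (∀ k : ℕ,
        (xs.foldl
          (fun new s =>
            if fr.getD s.toNat false then
              primes.foldl
                (fun new p => if s + p ≤ target then new.setIfInBounds (s + p).toNat true else new)
                new
            else new) new).getD k false = true ↔
        new.getD k false = true ∨
          ∃ s ∈ xs, fr.getD s.toNat false = true ∧ ∃ p ∈ primes, s + p ≤ target ∧ k = (s + p).toNat) := by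
  intro xs
  induction xs with
  | nil => intro new _ hsize; exact ⟨hsize, fun k => by simp⟩
  | cons s xs ih =>
    intro new hxs hsize
    have hs0 := hxs s List.mem_cons_self
    simp only [List.foldl_cons]
    by_cases hfr : fr.getD s.toNat false = true
    · rw [if_pos hfr]
      obtain ⟨hsz1, hmem1⟩ := markPrimes target s hs0 primes new hall hsize
      obtain ⟨hsz, hmem⟩ := ih _ (fun t ht => hxs t (List.mem_cons_of_mem _ ht)) hsz1
      refine ⟨hsz, fun k => ?_⟩
      rw [hmem k, hmem1 k]
      constructor
      · rintro ((h | ⟨q, hq, hqle, rfl⟩) | ⟨t, ht, hft, q, hq, hqle, rfl⟩)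
        · left; exact h
        · right; exact ⟨s, List.mem_cons_self, hfr, q, hq, hqle, rfl⟩
        · right; exact ⟨t, List.mem_cons_of_mem _ ht, hft, q, hq, hqle, rfl⟩
      · rintro (h | ⟨t, ht, hft, q, hq, hqle, rfl⟩)
        · left; left; exact h
        · rcases List.mem_cons.mp ht with rfl | ht'
          · left; right; exact ⟨q, hq, hqle, rfl⟩
          · right; exact ⟨t, ht', hft, q, hq, hqle, rfl⟩
    · rw [if_neg hfr]
      obtain ⟨hsz, hmem⟩ := ih new (fun t ht => hxs t (List.mem_cons_of_mem _ ht)) hsize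
      refine ⟨hsz, fun k => ?_⟩
      rw [hmem k]
      constructor
      · rintro (h | ⟨t, ht, hft, rest⟩)
        · left; exact h
        · right; exact ⟨t, List.mem_cons_of_mem _ ht, hft, rest⟩
      · rintro (h | ⟨t, ht, hft, rest⟩)
        · left; exact h
        · rcases List.mem_cons.mp ht with rfl | ht'
          · exact absurd hft hfr
          · right; exact ⟨t, ht', hft, rest⟩

theorem bfsStep_inv (target : Int) (h2 : 2 ≤ target) (primes : List Int)
    (hprimes : ∀ q : Int, q ∈ primes ↔ (2 ≤ q ∧ q < target + 1) ∧ Nat.Prime q.toNat)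
    (c : ℕ) (fr : Array Bool)
    (hinv : ∀ k : ℕ, k < (target + 1).toNat → (fr.getD k false = true ↔ ExprN c k)) :
    (bfsStep target primes fr).size = (target + 1).toNat ∧
    ∀ k : ℕ, k < (target + 1).toNat →
      ((bfsStep target primes fr).getD k false = true ↔ ExprN (c+1) k) := by
  have hall : ∀ p ∈ primes, 2 ≤ p := fun p hp => ((hprimes p).mp hp).1.1
  obtain ⟨hsz, hmem⟩ := stepOuter target primes hall fr (PySem.List.pyRange 0 (target + 1) 1)
      (Array.replicate (target + 1).toNat false)
      (fun t ht => (PySem.List.mem_pyRange_one.mp ht).1)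
      (by rw [Array.size_replicate])
  refine ⟨hsz, fun k hk => ?_⟩
  rw [bfsStep, hmem k, agetD_replicate hk _ _]
  constructor
  · rintro (h | ⟨t, ht, hft, q, hq, hqle, rfl⟩)
    · cases h
    · obtain ⟨ht0, htlt⟩ := PySem.List.mem_pyRange_one.mp ht
      obtain ⟨⟨hq2, hqlt⟩, hqp⟩ := (hprimes q).mp hq
      have hE : ExprN c t.toNat := (hinv t.toNat (by omega)).mp hft
      refine ⟨q.toNat, hqp, by omega, ?_⟩
      have : (t + q).toNat - q.toNat = t.toNat := by omega
      rw [this]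
      exact hE
  · rintro ⟨q, hq, hqk, hrest⟩
    right
    have hq2 := hq.two_le
    refine ⟨((k - q : ℕ) : Int), PySem.List.mem_pyRange_one.mpr ⟨by positivity, by omega⟩,
      (hinv (k - q) (by omega)).mpr (by simpa using hrest), (q : Int),
      (hprimes _).mpr ⟨⟨by exact_mod_cast hq2, by omega⟩, by simpa using hq⟩, by omega, by omega⟩

theorem bfsLoop_eq (target : Int) (h2 : 2 ≤ target) (primes : List Int)
    (hprimes : ∀ q : Int, q ∈ primes ↔ (2 ≤ q ∧ q < target + 1) ∧ Nat.Prime q.toNat)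
    (cmin : ℕ) (hcmin : ExprN cmin target.toNat)
    (hmin : ∀ c' : ℕ, c' < cmin → ¬ ExprN c' target.toNat) :
    ∀ (fuel c : ℕ) (fr : Array Bool),
      c ≤ cmin → cmin - c < fuel →
      (∀ k : ℕ, k < (target + 1).toNat → (fr.getD k false = true ↔ ExprN c k)) →
      bfsLoop target primes fuel fr (c : Int) = (cmin : Int) := by
  intro fuel
  induction fuel with
  | zero => intro c fr hc hf hinv; omega
  | succ fuel ih =>
    intro c fr hc hf hinv
    rw [bfsLoop]
    by_cases hmem : fr.getD target.toNat false = true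
    · rw [if_pos hmem]
      have hE : ExprN c target.toNat := (hinv target.toNat (by omega)).mp hmem
      have hceq : c = cmin := by
        by_contra hne
        exact hmin c (by omega) hE
      rw [hceq]
    · rw [if_neg hmem]
      have hclt : c < cmin := by
        rcases Nat.eq_or_lt_of_le hc with rfl | h
        · exact absurd ((hinv target.toNat (by omega)).mpr hcmin) hmem
        · exact h
      obtain ⟨-, hinv'⟩ := bfsStep_inv target h2 primes hprimes c fr hinv
      have := ih (c+1) (bfsStep target primes fr) (by omega) (by omega) hinv'
      rw [show ((c : Int) + 1) = ((c + 1 : ℕ) : Int) by push_cast; ring]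
      exact this

theorem solve_alt_eq_F (target : Int) (h2 : 2 ≤ target) :
    solve_alt target = (F target.toNat).untopD 0 := by
  have hn : ¬ target < 2 := by omega
  simp only [solve_alt, hn, if_false]
  have hprimes : ∀ q : Int, q ∈ (PySem.List.pyRange 2 (target + 1) 1).filter isPrimeB ↔
      (2 ≤ q ∧ q < target + 1) ∧ Nat.Prime q.toNat := by
    intro q
    rw [List.mem_filter, PySem.List.mem_pyRange_one]
    constructor
    · rintro ⟨⟨hq2, hqlt⟩, hqp⟩
      exact ⟨⟨hq2, hqlt⟩, ((isPrimeB_iff q).mp hqp).2⟩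
    · rintro ⟨⟨hq2, hqlt⟩, hqp⟩
      exact ⟨⟨hq2, hqlt⟩, (isPrimeB_iff q).mpr ⟨hq2, hqp⟩⟩
  have hex : ∃ c, ExprN c target.toNat := exprN_exists target.toNat (by omega)
  haveI : DecidablePred fun c => ExprN c target.toNat := fun c => Classical.dec _
  obtain ⟨cmin, hcmin, hmin⟩ :
      ∃ cmin : ℕ, ExprN cmin target.toNat ∧ ∀ c' : ℕ, c' < cmin → ¬ ExprN c' target.toNat :=
    ⟨Nat.find hex, Nat.find_spec hex, fun c' h => Nat.find_min hex h⟩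
  have hbound : 2 * cmin ≤ target.toNat := exprN_two_mul _ _ hcmin
  have hinv0 : ∀ k : ℕ, k < (target + 1).toNat →
      (((Array.replicate (target + 1).toNat false).setIfInBounds 0 true).getD k false = true ↔
        ExprN 0 k) := by
    intro k hk
    rcases Nat.eq_zero_or_pos k with rfl | hkpos
    · rw [agetD_set_self (by rw [Array.size_replicate]; omega) _ _]
      exact iff_of_true rfl rfl
    · rw [agetD_set_ne (by omega) _ _, agetD_replicate hk _ _]
      exact iff_of_false (by simp) (fun h => absurd (show k = 0 from h) (by omega))
  have hloop := bfsLoop_eq target h2 _ hprimes cmin hcmin hmin (target.toNat + 1) 0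
    ((Array.replicate (target + 1).toNat false).setIfInBounds 0 true)
    (by omega) (by omega) hinv0
  rw [show ((0:ℕ):Int) = 0 from rfl] at hloop
  rw [hloop]
  have hle : F target.toNat ≤ ((cmin : Int) : WithTop Int) := exprN_F _ _ hcmin
  obtain ⟨k, hk, hkle⟩ := WithTop.le_coe_iff.mp hle
  have hk0 : 0 ≤ k := F_nonneg _ _ hk
  have hkE : ExprN k.toNat target.toNat := by
    refine F_exprN _ _ ?_
    rw [hk]
    congr 1
    omega
  have hcle : cmin ≤ k.toNat := by
    by_contra hcon
    exact hmin k.toNat (by omega) hkE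
  have hkc : k = (cmin : Int) := by omega
  rw [hk, hkc]
  rfl

-- ===== VERDICT (by name: the statement is the Claim_ definition above) =====
theorem solve_spec : Claim_equal_solve := by
  intro target _
  unfold Spec_solve
  by_cases h : target < 2
  · simp [solve, solve_alt, h]
  · rw [solve_eq_F target (by omega), solve_alt_eq_F target (by omega)]
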